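-- pv_equiv track=rewrite | github.com/Lalan12309/Python- | main.py | possibleWinners
-- ===== SOURCE A (Python) =====
-- from itertools import permutations
--
-- def can_defeat(a, b):
--     # Try all permutations of a and b
--     for pa in permutations(a):
--         for pb in permutations(b):
--             wins = sum(pa[i] > pb[i] for i in range(3))
--             if wins >= 2:
--                 return True
--     return False
--
-- def possibleWinners(boost_a, boost_b, boost_c):
--     n = len(boost_a)
--     boosts = [boost_a, boost_b, boost_c]
--     result = 0
--
--     for i in range(n):
--         player = [boost_a[i], boost_b[i], boost_c[i]]
--         can_beat_all = True
--         for j in range(n):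
--             if i == j:
--                 continue
--             opponent = [boost_a[j], boost_b[j], boost_c[j]]
--             if not can_defeat(player, opponent):
--                 can_beat_all = False
--                 break
--         if can_beat_all:
--             result += 1
--     return result
-- ===== SOURCE B (Python) =====
-- def _beats2(p, o):
--     # p defeats o iff two disjoint winning pairs exist (a matching of size 2
--     # in the 3x3 "greater-than" bipartite graph), checked directly.
--     return any(p[i] > o[j] and p[k] > o[l]
--                for i in range(3) for j in range(3)
--                for k in range(3) for l in range(3)
--                if i != k and j != l)
--
-- def possibleWinners(boost_a, boost_b, boost_c):
--     players = list(zip(boost_a, boost_b, boost_c))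
--     return sum(
--         all(idx == jdx or _beats2(p, o) for jdx, o in enumerate(players))
--         for idx, p in enumerate(players)
--     )
-- ===== Notes on version B (the rewrite author's own statement) =====
-- stated objective: alternative
-- what changed: The inner defeat test no longer enumerates all 36 permutation pairs of the two rosters and sums wins per pair; it instead searches the 3x3 comparison matrix directly for two disjoint winning cells (a size-2 matching), and the outer scan is rebuilt over a zipped player list instead of parallel index loops.
-- outside the precondition, e.g. on possibleWinners([1, 2], [3], [4, 5]): A raises IndexError, B returns 1
import Mathlib
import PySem

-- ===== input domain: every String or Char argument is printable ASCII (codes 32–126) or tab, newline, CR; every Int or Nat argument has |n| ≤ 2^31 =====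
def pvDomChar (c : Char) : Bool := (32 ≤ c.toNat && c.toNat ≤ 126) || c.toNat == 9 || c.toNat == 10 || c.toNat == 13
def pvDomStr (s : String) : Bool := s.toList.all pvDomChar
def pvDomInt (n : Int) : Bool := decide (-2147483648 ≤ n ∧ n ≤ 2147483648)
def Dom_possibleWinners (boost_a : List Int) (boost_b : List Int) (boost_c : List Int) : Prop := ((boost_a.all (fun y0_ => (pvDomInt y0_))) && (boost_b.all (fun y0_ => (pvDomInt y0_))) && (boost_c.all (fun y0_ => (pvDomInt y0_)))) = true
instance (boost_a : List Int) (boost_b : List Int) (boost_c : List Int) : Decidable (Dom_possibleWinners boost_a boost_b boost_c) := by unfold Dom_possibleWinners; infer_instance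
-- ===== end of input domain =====

-- B replaces A's enumeration of all 36 permutation pairs (summing the wins of each pair) by a direct
-- search for two disjoint winning cells of the 3x3 comparison matrix; equal return values on Pre_.

-- ===== PORT A =====
-- itertools.permutations of the 3-element lists A builds (can_defeat is only ever
-- called on 3-element lists in A; other lengths never occur, ported as [])
def perm3 (l : List Int) : List (List Int) :=
  match l with
  | [x, y, z] => [[x,y,z],[x,z,y],[y,x,z],[y,z,x],[z,x,y],[z,y,x]]
  | _ => []

-- can_defeat: try all permutation pairs, True as soon as one pair gives wins >= 2
def canDefeat (a b : List Int) : Bool :=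
  (perm3 a).any fun pa => (perm3 b).any fun pb =>
    decide (2 ≤ ((PySem.List.pyRange 0 3 1).map
      (fun i => if decide (PySem.List.pyGetD pa i 0 > PySem.List.pyGetD pb i 0) then (1:Int) else 0)).sum)

-- indexing boost_b[i]/boost_c[i] with pyGetD is exact under Pre_ (every index 0..n-1 is in range)
def possibleWinners (boost_a : List Int) (boost_b : List Int) (boost_c : List Int) : Int :=
  let n : Int := boost_a.length
  (PySem.List.pyRange 0 n 1).foldl (fun result i =>
    let player := [PySem.List.pyGetD boost_a i 0, PySem.List.pyGetD boost_b i 0, PySem.List.pyGetD boost_c i 0]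
    let can_beat_all := (PySem.List.pyRange 0 n 1).all fun j =>
      i == j || canDefeat player
        [PySem.List.pyGetD boost_a j 0, PySem.List.pyGetD boost_b j 0, PySem.List.pyGetD boost_c j 0]
    if can_beat_all then result + 1 else result) 0

-- ===== PORT B =====
-- tuple indexing p[i] for a 3-tuple
def tget (t : Int × Int × Int) (i : Nat) : Int :=
  if i = 0 then t.1 else if i = 1 then t.2.1 else t.2.2

def beats2 (p o : Int × Int × Int) : Bool :=
  (List.range 3).any fun i => (List.range 3).any fun j =>
    (List.range 3).any fun k => (List.range 3).any fun l =>
      decide (i ≠ k) && decide (j ≠ l) &&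
      decide (tget p i > tget o j) && decide (tget p k > tget o l)

def possibleWinners_alt (boost_a : List Int) (boost_b : List Int) (boost_c : List Int) : Int :=
  let players := boost_a.zip (boost_b.zip boost_c)
  ((PySem.List.enumerate players).map (fun ip =>
    if (PySem.List.enumerate players).all (fun jo => ip.1 == jo.1 || beats2 ip.2 jo.2)
    then (1:Int) else 0)).sum

-- ===== PRECONDITION & SPEC =====
-- Pre_ excludes exactly the inputs on which A raises IndexError: boost_b or boost_c shorter than boost_a
def Pre_possibleWinners (boost_a : List Int) (boost_b : List Int) (boost_c : List Int) : Prop :=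
  boost_a.length ≤ boost_b.length ∧ boost_a.length ≤ boost_c.length
instance (boost_a : List Int) (boost_b : List Int) (boost_c : List Int) : Decidable (Pre_possibleWinners boost_a boost_b boost_c) := by unfold Pre_possibleWinners; infer_instance

def pvWitness_possibleWinners : List Int × List Int × List Int := ([1,2,3],[3,1,2],[2,3,1])

def Spec_possibleWinners (boost_a : List Int) (boost_b : List Int) (boost_c : List Int) (out : Int) : Prop := out = possibleWinners_alt boost_a boost_b boost_c
instance (boost_a : List Int) (boost_b : List Int) (boost_c : List Int) (out : Int) : Decidable (Spec_possibleWinners boost_a boost_b boost_c out) := by unfold Spec_possibleWinners; infer_instance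

-- ===== CLAIM (what is proved, stated in full; the proofs are below) =====
def Claim_equal_possibleWinners : Prop := ∀ (boost_a : List Int) (boost_b : List Int) (boost_c : List Int), Dom_possibleWinners boost_a boost_b boost_c → Pre_possibleWinners boost_a boost_b boost_c → Spec_possibleWinners boost_a boost_b boost_c (possibleWinners boost_a boost_b boost_c)

-- ===== LEMMAS AND PROOFS =====

-- a 0/1-valued prop-ite as a Bool cond, so the comparison atoms can be generalized to Bools
theorem ite_cond (p : Prop) [Decidable p] : (if p then (1:Int) else 0) = cond (decide p) 1 0 := by
  by_cases h : p <;> simp [h]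

-- pointwise: the two defeat tests agree on every pair of 3-element rosters.
-- Both sides are functions of the nine comparison bits p_i > o_j alone; generalize
-- them and check all 512 assignments.
theorem canDefeat_eq_beats2 (p1 p2 p3 o1 o2 o3 : Int) :
    canDefeat [p1,p2,p3] [o1,o2,o3] = beats2 (p1,p2,p3) (o1,o2,o3) := by
  simp only [canDefeat, beats2, perm3,
    show PySem.List.pyRange 0 3 1 = [0,1,2] from rfl,
    show (List.range 3) = [0,1,2] from rfl,
    List.any_cons, List.any_nil, List.map_cons, List.map_nil, List.sum_cons, List.sum_nil,
    gt_iff_lt]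
  simp only [PySem.List.pyGetD_ofNat', List.getD_cons_zero, List.getD_cons_succ,
    ite_cond, show ∀ x y z : Int, tget (x,y,z) 0 = x from fun _ _ _ => rfl,
    show ∀ x y z : Int, tget (x,y,z) 1 = y from fun _ _ _ => rfl,
    show ∀ x y z : Int, tget (x,y,z) 2 = z from fun _ _ _ => rfl]
  generalize decide (o1 < p1) = b11
  generalize decide (o2 < p1) = b12
  generalize decide (o3 < p1) = b13
  generalize decide (o1 < p2) = b21
  generalize decide (o2 < p2) = b22
  generalize decide (o3 < p2) = b23
  generalize decide (o1 < p3) = b31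
  generalize decide (o2 < p3) = b32
  generalize decide (o3 < p3) = b33
  revert b11 b12 b13 b21 b22 b23 b31 b32 b33
  decide

theorem possibleWinners_spec' (a b c : List Int)
    (h1 : a.length ≤ b.length) (h2 : a.length ≤ c.length) :
    possibleWinners a b c = possibleWinners_alt a b c := by
  have hlen : (a.zip (b.zip c)).length = a.length := by
    simp [List.length_zip]; omega
  have hget : ∀ j : Int, 0 ≤ j → j < (a.length : Int) →
      PySem.List.pyGetD (a.zip (b.zip c)) j (0,0,0)
        = (PySem.List.pyGetD a j 0, PySem.List.pyGetD b j 0, PySem.List.pyGetD c j 0) := by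
    intro j hj0 hj
    rw [PySem.List.pyGetD_eq_getElem _ (0,0,0) hj0 (by omega),
        PySem.List.pyGetD_eq_getElem a 0 hj0 (by exact_mod_cast hj),
        PySem.List.pyGetD_eq_getElem b 0 hj0 (by omega),
        PySem.List.pyGetD_eq_getElem c 0 hj0 (by omega)]
    simp [List.getElem_zip]
  simp only [possibleWinners, possibleWinners_alt]
  rw [PySem.List.enumerate_eq_map_pyRange _ (0,(0,0))]
  simp only [List.map_map, List.all_map, Function.comp_def]
  rw [PySem.List.foldl_count_if, PySem.List.sum_map_ite_one_zero]
  have hl : PySem.List.len (a.zip (b.zip c)) = (a.length : Int) := by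
    simp [PySem.List.len_eq, hlen]
  rw [hl]
  rw [zero_add]
  congr 1
  apply List.countP_congr
  intro i hi
  rw [PySem.List.mem_pyRange_one] at hi
  simp only [List.all_eq_true]
  apply forall₂_congr
  intro j hj
  rw [PySem.List.mem_pyRange_one] at hj
  rw [hget i hi.1 hi.2, hget j hj.1 hj.2, canDefeat_eq_beats2]

-- ===== VERDICT (by name: the statement is the Claim_ definition above) =====
theorem possibleWinners_spec : Claim_equal_possibleWinners := by
  intro a b c _ h
  exact possibleWinners_spec' a b c h.1 h.2
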